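-- pv_equiv track=rewrite | github.com/MartinDvorak/IP1 | set_greedy.py | gettuple
-- ===== SOURCE A (Python) =====
-- def gettuple(line):
-- 	l = []
-- 	item = 0
-- 	for ch in line:
--
-- 		if not item:
-- 			if ch == '\'':
-- 				item = 1
-- 				item_str = ''
-- 		elif item:
-- 			if ch == '\'':
-- 				item = 0
-- 				l.append(item_str)
-- 			else:
-- 				item_str = item_str + ch
-- 	return tuple(l)
-- ===== SOURCE B (Python) =====
-- def gettuple(line):
--     parts = line.split("'")
--     return tuple(p for i, p in enumerate(parts[:-1]) if i % 2 == 1)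
-- ===== Notes on version B (the rewrite author's own statement) =====
-- stated objective: faster
-- what changed: Replaces the hand-maintained inside/outside-quote flag state machine (which grows each item by repeated string concatenation) with one engine-driven split on the quote character followed by selecting the odd-indexed pieces (the contents of completed quote pairs).
import Mathlib
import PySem

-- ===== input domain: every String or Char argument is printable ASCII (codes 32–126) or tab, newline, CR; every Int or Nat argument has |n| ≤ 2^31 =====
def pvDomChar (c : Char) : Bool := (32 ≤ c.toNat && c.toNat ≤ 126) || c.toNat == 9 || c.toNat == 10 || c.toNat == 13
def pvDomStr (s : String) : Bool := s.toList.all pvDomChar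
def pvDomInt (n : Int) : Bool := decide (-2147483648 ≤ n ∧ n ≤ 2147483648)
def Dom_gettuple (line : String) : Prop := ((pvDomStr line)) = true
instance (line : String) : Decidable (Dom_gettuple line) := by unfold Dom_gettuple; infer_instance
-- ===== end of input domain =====

-- B replaces A's manual inside/outside-quote flag loop by a split on the quote
-- character plus selection of the odd-indexed completed pieces (idiomatic; same value).

-- ===== PORT A =====
-- A's for-loop, state (l, item, item_str), branches in source order
def gettupleLoop (l : List String) (item : Int) (itemStr : String) :
    List Char → List String
  | [] => l
  | ch :: rest =>
    if item = 0 then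
      if ch = '\'' then gettupleLoop l 1 "" rest
      else gettupleLoop l item itemStr rest
    else
      if ch = '\'' then gettupleLoop (l ++ [itemStr]) 0 itemStr rest
      else gettupleLoop l item (itemStr ++ String.ofList [ch]) rest

def gettuple (line : String) : List String :=
  gettupleLoop [] 0 "" line.toList

-- ===== PORT B =====
-- Source B: parts = line.split("'"); return tuple(p for i, p in enumerate(parts[:-1]) if i % 2 == 1)
-- str.split on a single character is List.splitOn; parts[:-1] is dropLast.
def gettuple_alt (line : String) : List String :=
  (PySem.List.enumerate
      (((line.toList.splitOn '\'').map (fun cs => String.ofList cs)).dropLast)).filterMap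
    (fun ip => if ip.1 % 2 = 1 then some ip.2 else none)

-- ===== PRECONDITION & SPEC =====
def Spec_gettuple (line : String) (out : List String) : Prop := out = gettuple_alt line
instance (line : String) (out : List String) : Decidable (Spec_gettuple line out) := by unfold Spec_gettuple; infer_instance

-- ===== CLAIM (what is proved, stated in full; the proofs are below) =====
def Claim_equal_gettuple : Prop := ∀ (line : String), Dom_gettuple line → Spec_gettuple line (gettuple line)

-- ===== LEMMAS AND PROOFS =====

-- contents of the completed quote pairs, read off the pieces after the opening quote
def pvChunk : List (List Char) → List String
  | [] => []
  | [_] => []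
  | p :: _ :: rest => String.ofList p :: pvChunk rest

-- what A's loop in the open state (item = 1, current content str) appends
def pvOpen (str : String) : List (List Char) → List String
  | [] => []
  | [_] => []
  | p0 :: ps => (str ++ String.ofList p0) :: pvChunk ps.tail

-- elements at odd positions of a list
def pvOdds : List String → List String
  | [] => []
  | [_] => []
  | _ :: y :: rest => y :: pvOdds rest

theorem pv_push_append (s : String) (c : Char) (l : List Char) :
    s ++ String.ofList [c] ++ String.ofList l = s ++ String.ofList (c :: l) := by
  rw [← String.toList_inj]; simp

theorem pv_splitOn_ne_nil (cs : List Char) : cs.splitOn '\'' ≠ [] :=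
  List.splitOnP_ne_nil _ _

theorem pv_open_empty (X : List (List Char)) : pvOpen "" X = pvChunk X := by
  rcases X with _ | ⟨p, ps⟩
  · rfl
  · cases ps <;> simp [pvOpen, pvChunk]

theorem pv_tail_modifyHead {α : Type} (f : α → α) (xs : List α) :
    (xs.modifyHead f).tail = xs.tail := by
  cases xs <;> simp

-- A's loop characterized by splitOn, in both states
theorem pv_loop_split (cs : List Char) :
    (∀ (l : List String) (s : String),
      gettupleLoop l 0 s cs = l ++ pvChunk (cs.splitOn '\'').tail) ∧
    (∀ (l : List String) (str : String),
      gettupleLoop l 1 str cs = l ++ pvOpen str (cs.splitOn '\'')) := by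
  induction cs with
  | nil =>
    constructor <;> intro l s <;>
      simp [gettupleLoop, List.splitOn, List.splitOnP_nil, pvChunk, pvOpen]
  | cons c rest ih =>
    have hsp : (c :: rest).splitOn '\'' =
        if c = '\'' then [] :: rest.splitOn '\''
        else (rest.splitOn '\'').modifyHead (List.cons c) := by
      simp only [List.splitOn, List.splitOnP_cons]
      by_cases h : c = '\'' <;> simp [h]
    constructor
    · intro l s
      by_cases h : c = '\''
      · have hL : gettupleLoop l 0 s (c :: rest) = gettupleLoop l 1 "" rest := by
          simp [gettupleLoop, h]
        rw [hL, ih.2 l "", hsp, if_pos h, List.tail_cons, pv_open_empty]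
      · have hL : gettupleLoop l 0 s (c :: rest) = gettupleLoop l 0 s rest := by
          simp [gettupleLoop, h]
        rw [hL, ih.1 l s, hsp, if_neg h, pv_tail_modifyHead]
    · intro l str
      by_cases h : c = '\''
      · have hL : gettupleLoop l 1 str (c :: rest) =
            gettupleLoop (l ++ [str]) 0 str rest := by
          simp [gettupleLoop, h]
        rw [hL, ih.1 (l ++ [str]) str, hsp, if_pos h]
        rcases hr : rest.splitOn '\'' with _ | ⟨p0, ps⟩
        · exact absurd hr (pv_splitOn_ne_nil rest)
        · simp [pvOpen]
      · have hL : gettupleLoop l 1 str (c :: rest) =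
            gettupleLoop l 1 (str ++ String.ofList [c]) rest := by
          simp [gettupleLoop, h]
        rw [hL, ih.2 l (str ++ String.ofList [c]), hsp, if_neg h]
        rcases hr : rest.splitOn '\'' with _ | ⟨p0, ps⟩
        · exact absurd hr (pv_splitOn_ne_nil rest)
        · cases ps <;> simp [pvOpen, List.modifyHead, pv_push_append]

-- the filterMap over enumerate started at an even index keeps the odd positions
theorem pv_filter_enum (L : List String) : ∀ (n : Int), n % 2 = 0 →
    (PySem.List.enumerate L n).filterMap
      (fun ip => if ip.1 % 2 = 1 then some ip.2 else none) = pvOdds L := by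
  induction L using pvOdds.induct with
  | case1 => intro n _; simp [PySem.List.enumerate, pvOdds]
  | case2 x =>
    intro n hn
    have h1 : n % 2 ≠ 1 := by omega
    simp [PySem.List.enumerate, pvOdds, h1]
  | case3 x y rest ih =>
    intro n hn
    have h1 : n % 2 ≠ 1 := by omega
    have h2 : (n + 1) % 2 = 1 := by omega
    have h3 : (n + 1 + 1) % 2 = 0 := by omega
    simp [h1, h2, pvOdds]
    exact ih (n + 1 + 1) h3

-- odd positions of (p0 :: ps) with the last element dropped = pvChunk ps
theorem pv_odds_chunk (ps : List (List Char)) : ∀ (p0 : List Char),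
    pvOdds (((p0 :: ps).map (fun cs => String.ofList cs)).dropLast) = pvChunk ps := by
  induction ps using pvChunk.induct with
  | case1 => intro p0; simp [pvOdds, pvChunk]
  | case2 q => intro p0; simp [pvOdds, pvChunk]
  | case3 q r rest ih =>
    intro p0
    have hih := ih r
    simp only [List.map_cons] at hih ⊢
    rw [List.dropLast_cons_of_ne_nil (by simp), List.dropLast_cons_of_ne_nil (by simp)]
    simp only [pvOdds, pvChunk]
    rw [hih]

-- ===== VERDICT (by name: the statement is the Claim_ definition above) =====
theorem gettuple_spec : Claim_equal_gettuple := by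
  intro line _
  unfold Spec_gettuple gettuple gettuple_alt
  rcases hr : line.toList.splitOn '\'' with _ | ⟨p0, ps⟩
  · exact absurd hr (pv_splitOn_ne_nil _)
  · rw [(pv_loop_split line.toList).1 [] "", hr,
      pv_filter_enum _ 0 (by norm_num), pv_odds_chunk ps p0]
    simp
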